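-- pv_equiv track=rewrite | github.com/PrithivP12/Science_Fair-25-26 | dook.py | compute_group_counts
-- ===== SOURCE A (Python) =====
-- from typing import Dict, List, Tuple, Optional, Any
--
-- GROUPS = {
--     "pos": {"ARG", "LYS", "HIS"},
--     "neg": {"ASP", "GLU"},
--     "polar": {"SER", "THR", "ASN", "GLN", "CYS"},
--     "arom": {"PHE", "TYR", "TRP"},
--     "hydro": {"ALA", "VAL", "LEU", "ILE", "MET", "PRO", "GLY"},
-- }
--
-- def compute_group_counts(resnames: List[str]) -> Dict[str, int]:
--     out = {f"count_{g}": 0 for g in GROUPS.keys()}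
--     for rn in resnames:
--         for g, s in GROUPS.items():
--             if rn in s:
--                 out[f"count_{g}"] += 1
--     out["count_apolar"] = out["count_hydro"]
--     out["count_aromatic"] = out["count_arom"]
--     out["formal_charge"] = out["count_pos"] - out["count_neg"]
--     return out
-- ===== SOURCE B (Python) =====
-- RESIDUE_TO_GROUP = {
--     "ARG": "pos", "LYS": "pos", "HIS": "pos",
--     "ASP": "neg", "GLU": "neg",
--     "SER": "polar", "THR": "polar", "ASN": "polar", "GLN": "polar", "CYS": "polar",
--     "PHE": "arom", "TYR": "arom", "TRP": "arom",
--     "ALA": "hydro", "VAL": "hydro", "LEU": "hydro",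
--     "ILE": "hydro", "MET": "hydro", "PRO": "hydro", "GLY": "hydro",
-- }
--
-- def compute_group_counts(resnames):
--     out = {f"count_{g}": 0 for g in ("pos", "neg", "polar", "arom", "hydro")}
--     for rn in resnames:
--         g = RESIDUE_TO_GROUP.get(rn)
--         if g is not None:
--             out[f"count_{g}"] += 1
--     out["count_apolar"] = out["count_hydro"]
--     out["count_aromatic"] = out["count_arom"]
--     out["formal_charge"] = out["count_pos"] - out["count_neg"]
--     return out
-- ===== Notes on version B (the rewrite author's own statement) =====
-- stated objective: simpler
-- what changed: Replaced A's inner scan over the five group sets per residue by a single lookup in a precomputed flat residue-to-group map (the five groups are disjoint, so the inner loop collapses to one dict get).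
import Mathlib
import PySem

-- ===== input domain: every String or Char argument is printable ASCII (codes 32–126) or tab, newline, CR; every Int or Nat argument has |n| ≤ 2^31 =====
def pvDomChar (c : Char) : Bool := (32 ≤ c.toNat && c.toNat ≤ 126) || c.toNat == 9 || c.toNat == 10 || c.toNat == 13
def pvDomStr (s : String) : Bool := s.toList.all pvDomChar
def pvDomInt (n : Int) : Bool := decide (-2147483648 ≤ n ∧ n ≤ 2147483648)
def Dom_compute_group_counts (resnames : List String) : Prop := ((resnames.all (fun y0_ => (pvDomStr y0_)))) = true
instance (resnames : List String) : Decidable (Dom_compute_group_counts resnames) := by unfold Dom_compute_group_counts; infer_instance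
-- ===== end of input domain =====

-- B replaces A's per-residue scan over all five group sets by a single lookup in a
-- precomputed residue→group map (objective: simpler — the inner loop disappears).

-- ===== PORT A =====
-- GROUPS: dict str → set of str; each set as the list of its distinct elements, the dict in insertion order
def pvGROUPS : List (String × List String) :=
  [("pos", ["ARG", "LYS", "HIS"]),
   ("neg", ["ASP", "GLU"]),
   ("polar", ["SER", "THR", "ASN", "GLN", "CYS"]),
   ("arom", ["PHE", "TYR", "TRP"]),
   ("hydro", ["ALA", "VAL", "LEU", "ILE", "MET", "PRO", "GLY"])]

-- body of A's outer loop: for g, s in GROUPS.items(): if rn in s: out[f"count_{g}"] += 1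
-- (out[k] += 1 is Dict.modify with default 0; exact here since the key is always present)
def pvAStep (out : PySem.Dict String Int) (rn : String) : PySem.Dict String Int :=
  pvGROUPS.foldl (fun out p => if rn ∈ p.2 then out.modify ("count_" ++ p.1) 0 (· + 1) else out) out

def compute_group_counts (resnames : List String) : List (String × Int) :=
  let out := pvGROUPS.foldl (fun d p => d.insert ("count_" ++ p.1) 0) PySem.Dict.empty
  let out := resnames.foldl pvAStep out
  let out := out.insert "count_apolar" (out.getD "count_hydro" 0)
  let out := out.insert "count_aromatic" (out.getD "count_arom" 0)
  let out := out.insert "formal_charge" (out.getD "count_pos" 0 - out.getD "count_neg" 0)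
  out.items

-- ===== PORT B =====
-- RESIDUE_TO_GROUP: a dict literal with 20 distinct keys, in source order
def pvR2G : PySem.Dict String String := PySem.Dict.mk
  [("ARG", "pos"), ("LYS", "pos"), ("HIS", "pos"),
   ("ASP", "neg"), ("GLU", "neg"),
   ("SER", "polar"), ("THR", "polar"), ("ASN", "polar"), ("GLN", "polar"), ("CYS", "polar"),
   ("PHE", "arom"), ("TYR", "arom"), ("TRP", "arom"),
   ("ALA", "hydro"), ("VAL", "hydro"), ("LEU", "hydro"),
   ("ILE", "hydro"), ("MET", "hydro"), ("PRO", "hydro"), ("GLY", "hydro")]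

-- body of B's loop: g = RESIDUE_TO_GROUP.get(rn); if g is not None: out[f"count_{g}"] += 1
def pvBStep (out : PySem.Dict String Int) (rn : String) : PySem.Dict String Int :=
  match pvR2G.get? rn with
  | some g => out.modify ("count_" ++ g) 0 (· + 1)
  | none => out

def compute_group_counts_alt (resnames : List String) : List (String × Int) :=
  let out := (["pos", "neg", "polar", "arom", "hydro"].foldl
      (fun d g => d.insert ("count_" ++ g) 0) PySem.Dict.empty)
  let out := resnames.foldl pvBStep out
  let out := out.insert "count_apolar" (out.getD "count_hydro" 0)
  let out := out.insert "count_aromatic" (out.getD "count_arom" 0)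
  let out := out.insert "formal_charge" (out.getD "count_pos" 0 - out.getD "count_neg" 0)
  out.items

-- ===== PRECONDITION & SPEC =====
def Spec_compute_group_counts (resnames : List String) (out : List (String × Int)) : Prop := out = compute_group_counts_alt resnames
instance (resnames : List String) (out : List (String × Int)) : Decidable (Spec_compute_group_counts resnames out) := by unfold Spec_compute_group_counts; infer_instance

-- ===== CLAIM (what is proved, stated in full; the proofs are below) =====
def Claim_equal_compute_group_counts : Prop := ∀ (resnames : List String), Dom_compute_group_counts resnames → Spec_compute_group_counts resnames (compute_group_counts resnames)

-- ===== LEMMAS AND PROOFS =====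

-- all twenty residue codes that occur in some group (the groups are pairwise disjoint)
def pvAll : List String := ["ARG","LYS","HIS","ASP","GLU","SER","THR","ASN","GLN","CYS","PHE","TYR","TRP","ALA","VAL","LEU","ILE","MET","PRO","GLY"]

-- the two per-residue loop bodies agree on every residue: the five group sets are disjoint,
-- so A's five membership tests fire at most once, matching B's single reverse-map lookup
theorem pvStep_eq (d : PySem.Dict String Int) (rn : String) : pvAStep d rn = pvBStep d rn := by
  by_cases h : rn ∈ pvAll
  · simp only [pvAll, List.mem_cons, List.not_mem_nil, or_false] at h
    rcases h with rfl|rfl|rfl|rfl|rfl|rfl|rfl|rfl|rfl|rfl|rfl|rfl|rfl|rfl|rfl|rfl|rfl|rfl|rfl|rfl <;> rfl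
  · simp only [pvAll, List.mem_cons, not_or] at h
    obtain ⟨h1,h2,h3,h4,h5,h6,h7,h8,h9,h10,h11,h12,h13,h14,h15,h16,h17,h18,h19,h20,-⟩ := h
    simp [pvAStep, pvGROUPS, pvBStep, pvR2G,
      h1,h2,h3,h4,h5,h6,h7,h8,h9,h10,h11,h12,h13,h14,h15,h16,h17,h18,h19,h20,
      Ne.symm h1, Ne.symm h2, Ne.symm h3, Ne.symm h4, Ne.symm h5, Ne.symm h6, Ne.symm h7,
      Ne.symm h8, Ne.symm h9, Ne.symm h10, Ne.symm h11, Ne.symm h12, Ne.symm h13, Ne.symm h14,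
      Ne.symm h15, Ne.symm h16, Ne.symm h17, Ne.symm h18, Ne.symm h19, Ne.symm h20,
      PySem.Dict.get?]

theorem pvStepFun_eq : pvAStep = pvBStep := funext fun d => funext fun rn => pvStep_eq d rn

theorem pvInit_eq :
    pvGROUPS.foldl (fun d p => d.insert ("count_" ++ p.1) 0) PySem.Dict.empty
      = ["pos", "neg", "polar", "arom", "hydro"].foldl
          (fun d g => d.insert ("count_" ++ g) 0) (PySem.Dict.empty (κ := String) (ν := Int)) := by
  decide

-- ===== VERDICT (by name: the statement is the Claim_ definition above) =====
theorem compute_group_counts_spec : Claim_equal_compute_group_counts := by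
  intro resnames _
  show compute_group_counts resnames = compute_group_counts_alt resnames
  unfold compute_group_counts compute_group_counts_alt
  simp only [pvInit_eq, pvStepFun_eq]
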